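-- pv_equiv track=rewrite | github.com/Brenokly/Teoria_Dos_Grafos | AlgoritmoBFS/BFSBuffado.py | breadth_first_search_tree
-- ===== SOURCE A (Python) =====
-- def create_adjacency_list(graph):
--     adjacency_list = {}
--     for i in range(len(graph)):
--         adjacency_list[i] = []
--         for j in range(len(graph[i])):
--             if graph[i][j] == 1:
--                 adjacency_list[i].append(j)
--     return adjacency_list
--
-- def breadth_first_search_tree(graph, start):
--     adjacency_list = create_adjacency_list(graph)
--     visited = [False] * len(graph)
--     queue = [start]
--     visited[start] = True
--     bfs_tree_edges = []
--     bfs_nodes = [start]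
--     parent = {start: None}
--
--     while queue:
--         node = queue.pop(0)
--         for neighbour in adjacency_list[node]:
--             if not visited[neighbour]:
--                 queue.append(neighbour)
--                 visited[neighbour] = True
--                 bfs_tree_edges.append((node, neighbour))
--                 bfs_nodes.append(neighbour)
--                 parent[neighbour] = node
--
--     return bfs_tree_edges, bfs_nodes, parent
-- ===== SOURCE B (Python) =====
-- def breadth_first_search_tree(graph, start):
--     visited = [False] * len(graph)
--     visited[start] = True
--
--     def grow(frontier):
--         # discover one whole level, then recurse on it
--         discovered = []
--         for node in frontier:
--             row = graph[node]
--             for j in range(len(row)):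
--                 if row[j] == 1 and not visited[j]:
--                     visited[j] = True
--                     discovered.append((node, j))
--         if not discovered:
--             return []
--         return discovered + grow([child for _, child in discovered])
--
--     bfs_tree_edges = grow([start])
--     bfs_nodes = [start] + [child for _, child in bfs_tree_edges]
--     parent = {start: None}
--     for node, child in bfs_tree_edges:
--         parent[child] = node
--     return bfs_tree_edges, bfs_nodes, parent
-- ===== Notes on version B (the rewrite author's own statement) =====
-- stated objective: alternative
-- what changed: Replaces the adjacency-list pre-pass plus FIFO-queue loop by a recursive level-by-level expansion: a recursive grow() discovers one whole frontier per call directly from the matrix rows and returns only the edge list, from which bfs_nodes and the parent dict are derived afterwards by post-processing instead of being maintained inside the loop.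
-- outside the precondition, e.g. on breadth_first_search_tree([[0, 0], [0, 0, 1]], 0): A returns ([], [0], {0: None}), B returns ([], [0], {0: None})
import Mathlib
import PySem

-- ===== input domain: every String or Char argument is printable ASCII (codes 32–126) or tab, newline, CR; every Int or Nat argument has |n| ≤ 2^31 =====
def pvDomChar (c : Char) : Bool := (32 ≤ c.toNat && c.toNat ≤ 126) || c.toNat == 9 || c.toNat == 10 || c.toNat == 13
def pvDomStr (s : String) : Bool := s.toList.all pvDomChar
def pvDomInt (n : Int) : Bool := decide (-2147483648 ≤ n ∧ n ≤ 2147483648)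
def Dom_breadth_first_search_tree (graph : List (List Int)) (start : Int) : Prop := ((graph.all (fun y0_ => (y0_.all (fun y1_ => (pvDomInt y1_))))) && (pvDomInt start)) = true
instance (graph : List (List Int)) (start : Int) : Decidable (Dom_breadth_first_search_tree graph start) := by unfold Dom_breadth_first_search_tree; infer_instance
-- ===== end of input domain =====

-- B replaces A's adjacency-list pre-pass + FIFO-queue loop by a recursive level-by-level
-- expansion that scans matrix rows on demand and returns only the edge list; bfs_nodes and the
-- parent dict are derived from that list afterwards.  Return-value equivalence is proved on Pre_.

-- ===== PORT A =====
def create_adjacency_list (graph : List (List Int)) : PySem.Dict Int (List Int) :=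
  (PySem.List.pyRange 0 (graph.length : Int) 1).foldl
    (fun d i =>
      let d1 := d.insert i []
      let gi := PySem.List.pyGetD graph i []
      (PySem.List.pyRange 0 (gi.length : Int) 1).foldl
        (fun d2 j =>
          if PySem.List.pyGetD gi j 0 = 1 then d2.modify i [] (fun l => l ++ [j]) else d2)
        d1)
    PySem.Dict.empty

def stepA (node : Int)
    (st : List Int × List Bool × List (Int × Int) × List Int × PySem.Dict Int (Option Int))
    (nb : Int) :
    List Int × List Bool × List (Int × Int) × List Int × PySem.Dict Int (Option Int) :=
  match st with
  | (q, vis, ed, nd, par) =>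
    if PySem.List.pyGetD vis nb true = false then
      (q ++ [nb], PySem.List.pySetD vis nb true, ed ++ [(node, nb)], nd ++ [nb],
       par.insert nb (some node))
    else (q, vis, ed, nd, par)

-- 'while queue:' as fuel recursion; graph.length + 1 rounds suffice on Pre_ (each enqueued
-- node flips one visited flag, so at most graph.length pops happen).
def bfsA (adj : PySem.Dict Int (List Int)) :
    Nat → List Int → List Bool → List (Int × Int) → List Int → PySem.Dict Int (Option Int) →
    (List (Int × Int)) × List Int × (List (Int × Option Int))
  | 0, _, _, edges, nodes, parent => (edges, nodes, parent.items)
  | _ + 1, [], _, edges, nodes, parent => (edges, nodes, parent.items)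
  | f + 1, node :: rest, visited, edges, nodes, parent =>
      let st := (adj.getD node []).foldl (stepA node) (rest, visited, edges, nodes, parent)
      bfsA adj f st.1 st.2.1 st.2.2.1 st.2.2.2.1 st.2.2.2.2

def breadth_first_search_tree (graph : List (List Int)) (start : Int) :
    (List (Int × Int)) × List Int × (List (Int × Option Int)) :=
  let adj := create_adjacency_list graph
  let visited := List.replicate graph.length false
  let queue := [start]
  let visited := PySem.List.pySetD visited start true
  bfsA adj (graph.length + 1) queue visited [] [start] (PySem.Dict.empty.insert start none)

-- ===== PORT B =====
-- 'if row[j] == 1 and not visited[j]: …' for one j of one popped row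
def scanStep (node : Int) (row : List Int) (st : List Bool × List (Int × Int)) (j : Int) :
    List Bool × List (Int × Int) :=
  if PySem.List.pyGetD row j 0 = 1 then
    if PySem.List.pyGetD st.1 j true = false then
      (PySem.List.pySetD st.1 j true, st.2 ++ [(node, j)])
    else st
  else st

-- the inner 'for j in range(len(row))' loop of grow, for one frontier node
def nodeScan (node : Int) (row : List Int) (st : List Bool × List (Int × Int)) :
    List Bool × List (Int × Int) :=
  (PySem.List.pyRange 0 (row.length : Int) 1).foldl (scanStep node row) st

-- the 'for node in frontier' loop of grow: one whole level of discoveries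
def levelScan (graph : List (List Int)) (frontier : List Int)
    (st : List Bool × List (Int × Int)) : List Bool × List (Int × Int) :=
  frontier.foldl (fun st node => nodeScan node (PySem.List.pyGetD graph node []) st) st

lemma lt_of_pyGetD_false (vis : List Bool) (j : Int) (h0 : 0 ≤ j)
    (h : PySem.List.pyGetD vis j true = false) : j < (vis.length : Int) := by
  obtain ⟨n, rfl⟩ := Int.eq_ofNat_of_zero_le h0
  simp only [PySem.List.pyGetD_natCast] at h
  by_contra h'
  rw [List.getD_eq_default] at h
  · simp at h
  · omega

-- termination lemmas for growB: each discovered edge flips one visited flag false→true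
lemma count_false_set (l : List Bool) (n : Nat) (h : n < l.length) (hf : l[n] = false) :
    (l.set n true).count false + 1 = l.count false := by
  conv_rhs => rw [← List.take_append_drop n l, ← List.getElem_cons_drop h]
  rw [List.set_eq_take_append_cons_drop, if_pos h]
  simp [List.count_append, hf]
  omega

lemma scanStep_count (node : Int) (row : List Int) (st : List Bool × List (Int × Int))
    (j : Int) (hj : 0 ≤ j) :
    (scanStep node row st j).1.count false + (scanStep node row st j).2.length
      = st.1.count false + st.2.length := by
  unfold scanStep
  split_ifs with h1 h2
  · have hlt := lt_of_pyGetD_false st.1 j hj h2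
    have hjn : j.toNat < st.1.length := by omega
    have hgf : st.1[j.toNat] = false := by
      rw [← PySem.List.pyGetD_eq_getElem st.1 true hj hlt]
      exact h2
    have hcnt := count_false_set st.1 j.toNat hjn hgf
    simp only [PySem.List.pySetD_of_nonneg st.1 true hj, List.length_append,
      List.length_cons, List.length_nil]
    omega
  · rfl
  · rfl

lemma scanFold_count (node : Int) (row : List Int) (l : List Int) (hl : ∀ j ∈ l, 0 ≤ j) :
    ∀ st : List Bool × List (Int × Int),
      (l.foldl (scanStep node row) st).1.count false + (l.foldl (scanStep node row) st).2.length
        = st.1.count false + st.2.length := by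
  induction l with
  | nil => intro st; rfl
  | cons j l ihl =>
    intro st
    simp only [List.foldl_cons]
    rw [ihl (fun x hx => hl x (List.mem_cons_of_mem _ hx)) (scanStep node row st j)]
    exact scanStep_count node row st j (hl j List.mem_cons_self)

lemma nodeScan_count (node : Int) (row : List Int) (st : List Bool × List (Int × Int)) :
    (nodeScan node row st).1.count false + (nodeScan node row st).2.length
      = st.1.count false + st.2.length := by
  unfold nodeScan
  exact scanFold_count node row _ (fun j hj => by
    have := (PySem.List.mem_pyRange_one).mp hj
    omega) st

lemma levelScan_count (graph : List (List Int)) (frontier : List Int) :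
    ∀ st : List Bool × List (Int × Int),
      (levelScan graph frontier st).1.count false + (levelScan graph frontier st).2.length
        = st.1.count false + st.2.length := by
  induction frontier with
  | nil => intro st; rfl
  | cons node rest ih =>
    intro st
    simp only [levelScan, List.foldl_cons]
    rw [show (List.foldl (fun st node => nodeScan node (PySem.List.pyGetD graph node []) st)
        (nodeScan node (PySem.List.pyGetD graph node []) st) rest)
      = levelScan graph rest (nodeScan node (PySem.List.pyGetD graph node []) st) from rfl]
    rw [ih (nodeScan node (PySem.List.pyGetD graph node []) st)]
    exact nodeScan_count node (PySem.List.pyGetD graph node []) st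

-- 'def grow(frontier): …' — recursive level-by-level expansion returning the edge list
def growB (graph : List (List Int)) (vis : List Bool) (frontier : List Int) :
    List (Int × Int) :=
  let st := levelScan graph frontier (vis, [])
  if h : st.2 = [] then []
  else st.2 ++ growB graph st.1 (st.2.map Prod.snd)
termination_by vis.count false
decreasing_by
  have hc := levelScan_count graph frontier (vis, [])
  have hlen : 0 < (levelScan graph frontier (vis, [])).2.length :=
    List.length_pos_of_ne_nil h
  simp only [List.length_nil, Nat.add_zero] at hc
  omega

def breadth_first_search_tree_alt (graph : List (List Int)) (start : Int) :
    (List (Int × Int)) × List Int × (List (Int × Option Int)) :=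
  let visited := PySem.List.pySetD (List.replicate graph.length false) start true
  let edges := growB graph visited [start]
  (edges, start :: edges.map Prod.snd,
   (edges.foldl (fun d p => d.insert p.2 (some p.1))
      (PySem.Dict.empty.insert start none)).items)

-- ===== PRECONDITION & SPEC =====
-- A raises IndexError/KeyError when start is outside [0, len(graph)) and IndexError when BFS
-- reaches a row whose 1-entry lies at a column ≥ len(graph); since reachability is not
-- closed-form, Pre_ requires EVERY 1-entry's column to be < len(graph), which also excludes
-- some graphs whose offending rows are unreachable (there A returns and B returns the same).
def Pre_breadth_first_search_tree (graph : List (List Int)) (start : Int) : Prop :=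
  0 ≤ start ∧ start < (graph.length : Int) ∧
    ∀ row ∈ graph, ∀ j ∈ List.range row.length, row.getD j 0 = 1 → j < graph.length
instance (graph : List (List Int)) (start : Int) :
    Decidable (Pre_breadth_first_search_tree graph start) := by
  unfold Pre_breadth_first_search_tree; infer_instance

def pvWitness_breadth_first_search_tree : List (List Int) × Int := ([[0, 1, 0], [1, 0, 1], [0, 1, 0]], 1)

def Spec_breadth_first_search_tree (graph : List (List Int)) (start : Int)
    (out : (List (Int × Int)) × List Int × (List (Int × Option Int))) : Prop :=
  out = breadth_first_search_tree_alt graph start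
instance (graph : List (List Int)) (start : Int)
    (out : (List (Int × Int)) × List Int × (List (Int × Option Int))) :
    Decidable (Spec_breadth_first_search_tree graph start out) := by
  unfold Spec_breadth_first_search_tree; infer_instance

-- ===== CLAIM (what is proved, stated in full; the proofs are below) =====
def Claim_equal_breadth_first_search_tree : Prop :=
  ∀ (graph : List (List Int)) (start : Int), Dom_breadth_first_search_tree graph start →
    Pre_breadth_first_search_tree graph start →
    Spec_breadth_first_search_tree graph start (breadth_first_search_tree graph start)

-- ===== LEMMAS AND PROOFS =====

-- the columns of row that hold a 1, in increasing order
def rowOnes (row : List Int) : List Int :=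
  (PySem.List.pyRange 0 (row.length : Int) 1).filter (fun j => PySem.List.pyGetD row j 0 = 1)

-- scanStep with the row test discharged (the fold of nodeScan filtered to rowOnes)
def innerD (node : Int) (st : List Bool × List (Int × Int)) (j : Int) :
    List Bool × List (Int × Int) :=
  if PySem.List.pyGetD st.1 j true = false then
    (PySem.List.pySetD st.1 j true, st.2 ++ [(node, j)])
  else st

lemma nodeScan_eq_filter (node : Int) (row : List Int) (st : List Bool × List (Int × Int)) :
    nodeScan node row st = (rowOnes row).foldl (innerD node) st := by
  unfold nodeScan rowOnes
  rw [List.foldl_filter]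
  congr 1
  funext st j
  by_cases hp : PySem.List.pyGetD row j 0 = 1 <;> simp [scanStep, innerD, hp]

lemma inner_getD (row : List Int) (k c : Int) (d : PySem.Dict Int (List Int)) :
    ((PySem.List.pyRange 0 (row.length : Int) 1).foldl
        (fun d2 j => if PySem.List.pyGetD row j 0 = 1 then d2.modify k [] (fun l => l ++ [j]) else d2) d).getD c []
      = d.getD c [] ++ (if c = k then rowOnes row else []) := by
  have hbody : (fun (d2 : PySem.Dict Int (List Int)) (j : Int) =>
      if PySem.List.pyGetD row j 0 = 1 then d2.modify k [] (fun l => l ++ [j]) else d2)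
      = (fun d2 j => if (fun j => decide (PySem.List.pyGetD row j 0 = 1)) j = true
          then (fun (d2 : PySem.Dict Int (List Int)) (j : Int) => d2.modify k [] (fun l => l ++ [j])) d2 j else d2) := by
    funext d2 j; simp
  rw [hbody, ← List.foldl_filter]
  rw [show (fun (d2 : PySem.Dict Int (List Int)) (j : Int) => d2.modify k [] (fun l => l ++ [j]))
        = (fun d2 j => (fun (d2 : PySem.Dict Int (List Int)) (p : Int × Int) => d2.modify p.1 [] (fun l => l ++ [p.2])) d2 ((fun j => ((k : Int), j)) j)) from rfl]
  rw [← List.foldl_map (f := fun j => ((k : Int), j))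
    (g := fun (d2 : PySem.Dict Int (List Int)) (p : Int × Int) => d2.modify p.1 [] (fun l => l ++ [p.2]))]
  rw [PySem.Dict.getD_foldl_modify_append]
  by_cases hc : c = k
  · subst hc
    simp [List.filter_map, Function.comp, rowOnes]
  · have hne : (k == c) = false := by simpa using Ne.symm hc
    simp [List.filter_map, Function.comp, hc, hne]

lemma create_spec (graph : List (List Int)) :
    ∀ (k : Nat), k ≤ graph.length → ∀ (i : Int),
      ((PySem.List.pyRange 0 (k : Int) 1).foldl
          (fun d i =>
            let d1 := d.insert i []
            let gi := PySem.List.pyGetD graph i []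
            (PySem.List.pyRange 0 (gi.length : Int) 1).foldl
              (fun d2 j =>
                if PySem.List.pyGetD gi j 0 = 1 then d2.modify i [] (fun l => l ++ [j]) else d2)
              d1)
          PySem.Dict.empty).getD i []
        = if 0 ≤ i ∧ i < (k : Int) then rowOnes (PySem.List.pyGetD graph i []) else [] := by
  intro k
  induction k with
  | zero =>
    intro _ i
    rw [PySem.List.pyRange_one_eq_nil (by omega)]
    simp only [List.foldl_nil, PySem.Dict.getD_empty]
    rw [if_neg (by omega)]
  | succ k ih =>
    intro hk i
    rw [show ((k + 1 : Nat) : Int) = (k : Int) + 1 by push_cast; ring]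
    rw [PySem.List.pyRange_one_succ_right (by omega)]
    rw [List.foldl_append]
    simp only [List.foldl_cons, List.foldl_nil]
    rw [inner_getD, PySem.Dict.getD_insert]
    by_cases hik : i = (k : Int)
    · subst hik
      rw [if_pos rfl, if_pos rfl, if_pos (by constructor <;> omega)]
      simp
    · simp only [if_neg hik]
      rw [ih (by omega) i]
      by_cases h1 : 0 ≤ i ∧ i < (k : Int)
      · rw [if_pos h1, if_pos (by omega), List.append_nil]
      · rw [if_neg h1, if_neg (by omega), List.append_nil]

lemma adj_getD (graph : List (List Int)) (node : Int) (h0 : 0 ≤ node)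
    (h1 : node < (graph.length : Int)) :
    (create_adjacency_list graph).getD node []
      = rowOnes (PySem.List.pyGetD graph node []) := by
  unfold create_adjacency_list
  rw [create_spec graph graph.length (le_refl _) node]
  simp [h0, h1]

-- one frontier node: A's queue step fold simulates B's (vis, discovered) fold
lemma inner_sim (node : Int) (l : List Int) (hl : ∀ j ∈ l, 0 ≤ j) :
    ∀ (vis : List Bool) (d : List (Int × Int)) (q0 : List Int) (ed0 : List (Int × Int))
      (nd0 : List Int) (par0 : PySem.Dict Int (Option Int)),
    (l.foldl (stepA node)
        (q0 ++ d.map Prod.snd, vis, ed0 ++ d, nd0 ++ d.map Prod.snd,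
         d.foldl (fun dd p => dd.insert p.2 (some p.1)) par0)
      = (q0 ++ (l.foldl (innerD node) (vis, d)).2.map Prod.snd,
         (l.foldl (innerD node) (vis, d)).1,
         ed0 ++ (l.foldl (innerD node) (vis, d)).2,
         nd0 ++ (l.foldl (innerD node) (vis, d)).2.map Prod.snd,
         (l.foldl (innerD node) (vis, d)).2.foldl (fun dd p => dd.insert p.2 (some p.1)) par0))
    ∧ (l.foldl (innerD node) (vis, d)).1.length = vis.length
    ∧ ∀ p ∈ (l.foldl (innerD node) (vis, d)).2,
        p ∈ d ∨ (0 ≤ p.2 ∧ p.2 < (vis.length : Int)) := by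
  induction l with
  | nil =>
    intro vis d q0 ed0 nd0 par0
    exact ⟨rfl, rfl, fun p hp => Or.inl hp⟩
  | cons j l ihl =>
    intro vis d q0 ed0 nd0 par0
    have hj : 0 ≤ j := hl j List.mem_cons_self
    have hl' : ∀ x ∈ l, 0 ≤ x := fun x hx => hl x (List.mem_cons_of_mem _ hx)
    simp only [List.foldl_cons]
    by_cases hv : PySem.List.pyGetD vis j true = false
    · have hjlt : j < (vis.length : Int) := lt_of_pyGetD_false vis j hj hv
      have hstepA : stepA node
          (q0 ++ d.map Prod.snd, vis, ed0 ++ d, nd0 ++ d.map Prod.snd,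
           d.foldl (fun dd p => dd.insert p.2 (some p.1)) par0) j
          = (q0 ++ (d ++ [(node, j)]).map Prod.snd, PySem.List.pySetD vis j true,
             ed0 ++ (d ++ [(node, j)]), nd0 ++ (d ++ [(node, j)]).map Prod.snd,
             (d ++ [(node, j)]).foldl (fun dd p => dd.insert p.2 (some p.1)) par0) := by
        simp [stepA, hv]
      have hinner : innerD node (vis, d) j
          = (PySem.List.pySetD vis j true, d ++ [(node, j)]) := by simp [innerD, hv]
      rw [hstepA, hinner]
      have := ihl hl' (PySem.List.pySetD vis j true) (d ++ [(node, j)]) q0 ed0 nd0 par0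
      obtain ⟨e1, e2, e3⟩ := this
      refine ⟨e1, ?_, ?_⟩
      · rw [e2, PySem.List.length_pySetD]
      · intro p hp
        rcases e3 p hp with hp' | hp'
        · rcases List.mem_append.mp hp' with hp'' | hp''
          · exact Or.inl hp''
          · simp at hp''
            subst hp''
            exact Or.inr ⟨hj, hjlt⟩
        · rw [PySem.List.length_pySetD] at hp'
          exact Or.inr hp'
    · have hstepA : stepA node
          (q0 ++ d.map Prod.snd, vis, ed0 ++ d, nd0 ++ d.map Prod.snd,
           d.foldl (fun dd p => dd.insert p.2 (some p.1)) par0) j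
          = (q0 ++ d.map Prod.snd, vis, ed0 ++ d, nd0 ++ d.map Prod.snd,
             d.foldl (fun dd p => dd.insert p.2 (some p.1)) par0) := by simp [stepA, hv]
      have hinner : innerD node (vis, d) j = (vis, d) := by simp [innerD, hv]
      rw [hstepA, hinner]
      exact ihl hl' vis d q0 ed0 nd0 par0

-- one whole level: popping all frontier nodes of A's queue equals levelScan
lemma level_sim (graph : List (List Int)) (Fr : List Int)
    (hFr : ∀ x ∈ Fr, 0 ≤ x ∧ x < (graph.length : Int)) :
    ∀ (vis : List Bool) (d : List (Int × Int)) (f : Nat) (ed0 : List (Int × Int))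
      (nd0 : List Int) (par0 : PySem.Dict Int (Option Int)),
    vis.length = graph.length →
    (∀ p ∈ d, 0 ≤ p.2 ∧ p.2 < (graph.length : Int)) →
    (bfsA (create_adjacency_list graph) (Fr.length + f) (Fr ++ d.map Prod.snd) vis
        (ed0 ++ d) (nd0 ++ d.map Prod.snd)
        (d.foldl (fun dd p => dd.insert p.2 (some p.1)) par0)
      = bfsA (create_adjacency_list graph) f ((levelScan graph Fr (vis, d)).2.map Prod.snd)
          (levelScan graph Fr (vis, d)).1 (ed0 ++ (levelScan graph Fr (vis, d)).2)
          (nd0 ++ (levelScan graph Fr (vis, d)).2.map Prod.snd)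
          ((levelScan graph Fr (vis, d)).2.foldl (fun dd p => dd.insert p.2 (some p.1)) par0))
    ∧ (levelScan graph Fr (vis, d)).1.length = vis.length
    ∧ ∀ p ∈ (levelScan graph Fr (vis, d)).2, 0 ≤ p.2 ∧ p.2 < (graph.length : Int) := by
  revert hFr
  induction Fr with
  | nil =>
    intro _ vis d f ed0 nd0 par0 hvis hd
    exact ⟨by simp [levelScan], rfl, hd⟩
  | cons node rest ih =>
    intro hFr vis d f ed0 nd0 par0 hvis hd
    have hnode := hFr node List.mem_cons_self
    have hrest : ∀ x ∈ rest, 0 ≤ x ∧ x < (graph.length : Int) :=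
      fun x hx => hFr x (List.mem_cons_of_mem _ hx)
    have hlen1 : (node :: rest).length + f = (rest.length + f) + 1 := by
      simp [Nat.add_right_comm]
    rw [hlen1]
    simp only [List.cons_append, bfsA]
    rw [adj_getD graph node hnode.1 hnode.2]
    obtain ⟨e1, e2, e3⟩ := inner_sim node (rowOnes (PySem.List.pyGetD graph node []))
      (fun j hjm => by
        have h2 : (0 ≤ j ∧ j < ((PySem.List.pyGetD graph node []).length : Int)) ∧
            PySem.List.pyGetD (PySem.List.pyGetD graph node []) j 0 = 1 := by
          simpa [rowOnes] using hjm
        exact h2.1.1) vis d rest ed0 nd0 par0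
    rw [e1]
    rw [← nodeScan_eq_filter node (PySem.List.pyGetD graph node []) (vis, d)] at e1 e2 e3 ⊢
    have hDlen : (nodeScan node (PySem.List.pyGetD graph node []) (vis, d)).1.length
        = graph.length := by rw [e2, hvis]
    have hDmem : ∀ p ∈ (nodeScan node (PySem.List.pyGetD graph node []) (vis, d)).2,
        0 ≤ p.2 ∧ p.2 < (graph.length : Int) := by
      intro p hp
      rcases e3 p hp with hp' | hp'
      · exact hd p hp'
      · rw [hvis] at hp'
        exact hp'
    have hlev : levelScan graph (node :: rest) (vis, d)
        = levelScan graph rest (nodeScan node (PySem.List.pyGetD graph node []) (vis, d)) := rfl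
    rw [hlev]
    obtain ⟨f1, f2, f3⟩ := ih hrest (nodeScan node (PySem.List.pyGetD graph node []) (vis, d)).1
      (nodeScan node (PySem.List.pyGetD graph node []) (vis, d)).2 f ed0 nd0 par0 hDlen hDmem
    exact ⟨f1, by rw [f2, e2, hvis], f3⟩

lemma bfsA_nil (adj : PySem.Dict Int (List Int)) (f : Nat) (vis : List Bool)
    (ed : List (Int × Int)) (nd : List Int) (par : PySem.Dict Int (Option Int)) :
    bfsA adj f [] vis ed nd par = (ed, nd, par.items) := by
  cases f <;> rfl

-- the main simulation: A's fueled queue loop computes B's growB, given enough fuel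
lemma bfs_grow (graph : List (List Int)) :
    ∀ (f : Nat) (Fr : List Int) (vis : List Bool),
      (∀ x ∈ Fr, 0 ≤ x ∧ x < (graph.length : Int)) → vis.length = graph.length →
      vis.count false + Fr.length ≤ f →
      ∀ (ed : List (Int × Int)) (nd : List Int) (par : PySem.Dict Int (Option Int)),
      bfsA (create_adjacency_list graph) f Fr vis ed nd par
        = (ed ++ growB graph vis Fr, nd ++ (growB graph vis Fr).map Prod.snd,
           ((growB graph vis Fr).foldl (fun dd p => dd.insert p.2 (some p.1)) par).items) := by
  intro f
  induction f using Nat.strong_induction_on with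
  | _ f ih =>
    intro Fr vis hFr hvis hfuel ed nd par
    cases Fr with
    | nil =>
      rw [bfsA_nil]
      rw [growB]
      simp [levelScan]
    | cons node rest =>
      have hg : f = (node :: rest).length + (f - (node :: rest).length) := by
        simp at hfuel ⊢
        omega
      rw [hg]
      obtain ⟨heq, hlen', hmem'⟩ := level_sim graph (node :: rest) hFr vis []
        (f - (node :: rest).length) ed nd par hvis (by simp)
      simp only [List.map_nil, List.append_nil, List.foldl_nil] at heq
      rw [heq]
      rw [growB]
      by_cases hD : (levelScan graph (node :: rest) (vis, [])).2 = []
      · rw [dif_pos hD, hD]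
        simp only [List.map_nil, List.append_nil, List.foldl_nil]
        exact bfsA_nil _ _ _ _ _ _
      · rw [dif_neg hD]
        have hcnt := levelScan_count graph (node :: rest) (vis, [])
        simp only [List.length_nil, Nat.add_zero] at hcnt
        have hrec := ih (f - (node :: rest).length)
          (by simp at hfuel ⊢; omega)
          ((levelScan graph (node :: rest) (vis, [])).2.map Prod.snd)
          (levelScan graph (node :: rest) (vis, [])).1
          (by
            intro x hx
            obtain ⟨p, hp, rfl⟩ := List.mem_map.mp hx
            exact hmem' p hp)
          (by rw [hlen', hvis])
          (by
            simp only [List.length_map]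
            have hb : (node :: rest).length = rest.length + 1 := rfl
            simp at hfuel
            omega)
          (ed ++ (levelScan graph (node :: rest) (vis, [])).2)
          (nd ++ (levelScan graph (node :: rest) (vis, [])).2.map Prod.snd)
          ((levelScan graph (node :: rest) (vis, [])).2.foldl
            (fun dd p => dd.insert p.2 (some p.1)) par)
        rw [hrec]
        simp [List.append_assoc, List.map_append, List.foldl_append]

-- ===== VERDICT (by name: the statement is the Claim_ definition above) =====
theorem breadth_first_search_tree_spec : Claim_equal_breadth_first_search_tree := by
  intro graph start _ hpre
  obtain ⟨h0, h1, _⟩ := hpre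
  unfold Spec_breadth_first_search_tree
  unfold breadth_first_search_tree breadth_first_search_tree_alt
  have hlen : (PySem.List.pySetD (List.replicate graph.length false) start true).length
      = graph.length := by simp [PySem.List.length_pySetD]
  have hcnt : (PySem.List.pySetD (List.replicate graph.length false) start true).count false
      ≤ graph.length := by
    calc (PySem.List.pySetD (List.replicate graph.length false) start true).count false
        ≤ (PySem.List.pySetD (List.replicate graph.length false) start true).length :=
          List.count_le_length
      _ = graph.length := hlen
  have := bfs_grow graph (graph.length + 1) [start]
    (PySem.List.pySetD (List.replicate graph.length false) start true)
    (by intro x hx; simp at hx; subst hx; exact ⟨h0, h1⟩) hlen (by simp; omega)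
    [] [start] (PySem.Dict.empty.insert start none)
  simpa using this
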